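-- pv_equiv track=rewrite | github.com/anton31kah/AdventOfCode | src/year2023/day11/part2.py | expand_space
-- ===== SOURCE A (Python) =====
-- def expand_space(galaxies, empty_rows, empty_cols, expansion=2):
--     new_galaxies = []
--
--     for x, y in galaxies:
--         x_diff = sum(expansion - 1 for col in empty_cols if x > col)
--         y_diff = sum(expansion - 1 for row in empty_rows if y > row)
--         new_x, new_y = x + x_diff, y + y_diff
--         new_galaxies.append((new_x, new_y))
--
--     return new_galaxies
-- ===== SOURCE B (Python) =====
-- def expand_space(galaxies, empty_rows, empty_cols, expansion=2):
--     # Sort the empty rows/cols once, then count per galaxy by binary search.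
--     def bisect_left(a, x):
--         lo, hi = 0, len(a)
--         while lo < hi:
--             mid = (lo + hi) // 2
--             if a[mid] < x:
--                 lo = mid + 1
--             else:
--                 hi = mid
--         return lo
--
--     cols = sorted(empty_cols)
--     rows = sorted(empty_rows)
--     k = expansion - 1
--     return [(x + k * bisect_left(cols, x), y + k * bisect_left(rows, y))
--             for x, y in galaxies]
-- ===== Notes on version B (the rewrite author's own statement) =====
-- stated objective: faster
-- what changed: Instead of re-scanning all empty columns and rows for every galaxy, B sorts them once and counts the empties below each coordinate with a binary search, multiplying by (expansion-1) instead of summing a constant repeatedly.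
import Mathlib
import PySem

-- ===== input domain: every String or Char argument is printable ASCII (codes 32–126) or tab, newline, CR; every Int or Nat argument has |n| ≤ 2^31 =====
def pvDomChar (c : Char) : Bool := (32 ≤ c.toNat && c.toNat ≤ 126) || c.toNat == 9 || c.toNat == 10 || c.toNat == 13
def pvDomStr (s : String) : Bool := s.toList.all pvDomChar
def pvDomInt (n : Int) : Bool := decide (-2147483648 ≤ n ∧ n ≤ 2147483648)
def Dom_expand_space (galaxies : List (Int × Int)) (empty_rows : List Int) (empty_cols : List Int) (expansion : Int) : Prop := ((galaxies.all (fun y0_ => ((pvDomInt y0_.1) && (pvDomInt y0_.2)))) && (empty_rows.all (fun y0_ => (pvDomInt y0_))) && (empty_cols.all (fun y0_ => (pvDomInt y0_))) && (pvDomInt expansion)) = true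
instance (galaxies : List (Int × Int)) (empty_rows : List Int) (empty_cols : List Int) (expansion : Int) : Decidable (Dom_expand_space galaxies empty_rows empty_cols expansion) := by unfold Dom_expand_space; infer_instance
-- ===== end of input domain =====

-- B replaces A's per-galaxy rescans of the empty rows/cols by sorting them once and binary-searching the count per galaxy (faster).


-- ===== PORT A =====
-- A: for each galaxy, re-scan all empty cols/rows summing (expansion-1) per empty one strictly below.
def expand_space (galaxies : List (Int × Int)) (empty_rows : List Int) (empty_cols : List Int) (expansion : Int) : List (Int × Int) :=
  galaxies.foldl (fun new_galaxies g =>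
    let x := g.1
    let y := g.2
    let x_diff := empty_cols.foldl (fun s col => if x > col then s + (expansion - 1) else s) 0
    let y_diff := empty_rows.foldl (fun s row => if y > row then s + (expansion - 1) else s) 0
    new_galaxies ++ [(x + x_diff, y + y_diff)]) []

-- ===== PORT B =====
-- B: sort the empties once, then per galaxy count the ones below by binary search
-- (Source B's hand-written lo/hi bisect_left loop is exactly the prelude's PySem.List.bisectLeft).
def expand_space_alt (galaxies : List (Int × Int)) (empty_rows : List Int) (empty_cols : List Int) (expansion : Int) : List (Int × Int) :=
  let cols := PySem.List.sorted empty_cols (fun v => v) false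
  let rows := PySem.List.sorted empty_rows (fun v => v) false
  let k := expansion - 1
  galaxies.map (fun g =>
    (g.1 + k * ((PySem.List.bisectLeft cols g.1 : Nat) : Int),
     g.2 + k * ((PySem.List.bisectLeft rows g.2 : Nat) : Int)))

-- ===== PRECONDITION & SPEC =====
def Spec_expand_space (galaxies : List (Int × Int)) (empty_rows : List Int) (empty_cols : List Int) (expansion : Int) (out : List (Int × Int)) : Prop := out = expand_space_alt galaxies empty_rows empty_cols expansion
instance (galaxies : List (Int × Int)) (empty_rows : List Int) (empty_cols : List Int) (expansion : Int) (out : List (Int × Int)) : Decidable (Spec_expand_space galaxies empty_rows empty_cols expansion out) := by unfold Spec_expand_space; infer_instance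

-- ===== CLAIM (what is proved, stated in full; the proofs are below) =====
def Claim_equal_expand_space : Prop := ∀ (galaxies : List (Int × Int)) (empty_rows : List Int) (empty_cols : List Int) (expansion : Int), Dom_expand_space galaxies empty_rows empty_cols expansion → Spec_expand_space galaxies empty_rows empty_cols expansion (expand_space galaxies empty_rows empty_cols expansion)

-- ===== LEMMAS AND PROOFS =====

-- A's outer loop (append one result per galaxy) is a map.
lemma foldl_append_map (f : (Int × Int) → (Int × Int)) :
    ∀ (l acc : List (Int × Int)), l.foldl (fun a g => a ++ [f g]) acc = acc ++ l.map f := by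
  intro l
  induction l with
  | nil => simp
  | cons h t ih => intro acc; simp [List.foldl, ih]

-- A's inner sum is (expansion-1) times the count of empties strictly below x.
lemma foldl_sum_eq_count (x k : Int) :
    ∀ (l : List Int) (s : Int),
      l.foldl (fun s col => if x > col then s + k else s) s
        = s + k * (l.countP (fun col => decide (col < x)) : Int) := by
  intro l
  induction l with
  | nil => intro s; simp
  | cons h t ih =>
    intro s
    by_cases hc : h < x
    · simp [List.foldl, hc, ih]; ring
    · simp [List.foldl, hc, ih, gt_iff_lt]

-- On a sorted list, bisectLeft returns the number of elements < x.
lemma countP_eq_of_split (p : Int → Bool) :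
    ∀ (l : List Int) (b : Nat), b ≤ l.length →
      (∀ (j : Nat) (hj : j < l.length), j < b → p l[j] = true) →
      (∀ (j : Nat) (hj : j < l.length), b ≤ j → p l[j] = false) →
      l.countP p = b := by
  intro l
  induction l with
  | nil =>
    intro b hb _ _
    simp only [List.length_nil, Nat.le_zero] at hb
    simp [hb]
  | cons h t ih =>
    intro b hb h1 h2
    cases b with
    | zero =>
      have hh : p h = false := h2 0 (by simp) (Nat.zero_le _)
      have ht : t.countP p = 0 := by
        apply ih 0 (Nat.zero_le _)
        · intro j hj hj0; omega
        · intro j hj _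
          have := h2 (j+1) (by simpa using Nat.succ_lt_succ hj) (Nat.zero_le _)
          simpa using this
      simp [hh, ht]
    | succ b' =>
      have hh : p h = true := h1 0 (by simp) (Nat.succ_pos _)
      have ht : t.countP p = b' := by
        apply ih b' (by simpa using Nat.succ_le_succ_iff.mp hb)
        · intro j hj hjb
          have := h1 (j+1) (by simpa using Nat.succ_lt_succ hj) (by omega)
          simpa using this
        · intro j hj hjb
          have := h2 (j+1) (by simpa using Nat.succ_lt_succ hj) (by omega)
          simpa using this
      simp [hh, ht]

lemma bisectLeft_eq_countP (l : List Int) (x : Int) (hs : l.Pairwise (· ≤ ·)) :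
    PySem.List.bisectLeft l x = l.countP (fun col => decide (col < x)) := by
  obtain ⟨hle, hlt, hge⟩ := PySem.List.bisectLeft_spec l x hs
  exact (countP_eq_of_split _ l _ hle
    (fun j hj hjb => by simpa using hlt j hj hjb)
    (fun j hj hjb => by simpa using not_lt.mpr (hge j hj hjb))).symm

lemma count_sorted (l : List Int) (x : Int) :
    PySem.List.bisectLeft (PySem.List.sorted l (fun v => v) false) x
      = l.countP (fun col => decide (col < x)) := by
  rw [bisectLeft_eq_countP _ x (by simpa using PySem.List.sorted_pairwise l (fun v => v))]
  exact (PySem.List.sorted_perm l (fun v => v) false).countP_eq _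

-- ===== VERDICT (by name: the statement is the Claim_ definition above) =====
theorem expand_space_spec : Claim_equal_expand_space := by
  intro galaxies empty_rows empty_cols expansion _
  unfold Spec_expand_space expand_space expand_space_alt
  rw [foldl_append_map]
  simp only [List.nil_append]
  apply List.map_congr_left
  intro g _
  rw [foldl_sum_eq_count, foldl_sum_eq_count, count_sorted, count_sorted]
  simp
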